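-- pv_equiv track=rewrite | github.com/Eswanth13/oops_workoutside | alternatecapitalize.py | reverse_cap_lower
-- ===== SOURCE A (Python) =====
-- def reverse_cap_lower(string):
--     FormattedString = ""
--     for (position,ch) in enumerate(string):
--         if position % 2 == 0:
--             FormattedString = FormattedString + str(ch).lower()
--         else:
--             FormattedString = FormattedString + str(ch).upper()
--     return FormattedString
-- ===== SOURCE B (Python) =====
-- def reverse_cap_lower(string):
--     # Pairwise walk: consume two characters per step (lower, upper); no position counter or parity test.
--     out = []
--     i = 0
--     n = len(string)
--     while i + 1 < n:
--         out.append(string[i].lower())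
--         out.append(string[i + 1].upper())
--         i += 2
--     if i < n:
--         out.append(string[i].lower())
--     return "".join(out)
-- ===== Notes on version B (the rewrite author's own statement) =====
-- stated objective: alternative
-- what changed: Replaces the enumerate-with-parity-test string-concatenation accumulator by a pairwise loop consuming two characters per step (lowercase the first, uppercase the second) into a list joined once, so no position counter or modulus test exists.
import Mathlib
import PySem

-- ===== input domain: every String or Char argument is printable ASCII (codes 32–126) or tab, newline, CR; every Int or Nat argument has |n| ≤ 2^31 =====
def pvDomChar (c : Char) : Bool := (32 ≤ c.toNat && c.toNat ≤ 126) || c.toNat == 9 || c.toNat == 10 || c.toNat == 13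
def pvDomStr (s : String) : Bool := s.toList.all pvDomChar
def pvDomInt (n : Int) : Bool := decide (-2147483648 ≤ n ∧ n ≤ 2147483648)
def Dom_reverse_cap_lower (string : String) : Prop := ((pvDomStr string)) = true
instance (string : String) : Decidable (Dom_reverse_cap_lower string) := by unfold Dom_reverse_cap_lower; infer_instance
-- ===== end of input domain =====

-- B replaces A's enumerate/parity accumulator loop by a pairwise loop consuming two characters per step (alternative decomposition, same cost).

-- ===== PORT A =====
-- A's loop body: append lowered char at even positions, uppered char at odd positions.
def pvStepA (acc : List Char) (pc : Int × Char) : List Char :=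
  if PySem.Int.mod pc.1 2 == 0 then acc ++ [PySem.Chars.lowerChar pc.2]
  else acc ++ [PySem.Chars.upperChar pc.2]

def reverse_cap_lower (string : String) : String :=
  String.ofList ((PySem.List.enumerate string.toList 0).foldl pvStepA [])

-- ===== PORT B =====
-- Source B's while loop: two characters per step (lower, upper) appended to out; trailing leftover lowered; "".join(out).
def pvPairs (out : List Char) : List Char → List Char
  | a :: b :: rest => pvPairs (out ++ [PySem.Chars.lowerChar a, PySem.Chars.upperChar b]) rest
  | [c] => out ++ [PySem.Chars.lowerChar c]
  | [] => out

def reverse_cap_lower_alt (string : String) : String :=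
  String.ofList (pvPairs [] string.toList)

-- ===== PRECONDITION & SPEC =====
def Spec_reverse_cap_lower (string : String) (out : String) : Prop := out = reverse_cap_lower_alt string
instance (string : String) (out : String) : Decidable (Spec_reverse_cap_lower string out) := by unfold Spec_reverse_cap_lower; infer_instance

-- ===== CLAIM (what is proved, stated in full; the proofs are below) =====
def Claim_equal_reverse_cap_lower : Prop := ∀ (string : String), Dom_reverse_cap_lower string → Spec_reverse_cap_lower string (reverse_cap_lower string)

-- ===== LEMMAS AND PROOFS =====
lemma pvFold_enumerate (cs : List Char) (n : Nat) (acc : List Char) :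
    (PySem.List.enumerate cs (2 * (n : Int))).foldl pvStepA acc = pvPairs acc cs := by
  match cs with
  | [] => simp [PySem.List.enumerate, pvPairs]
  | [c] => simp [PySem.List.enumerate, pvPairs, pvStepA]
  | a :: b :: rest =>
      have h2 : (2 * (n : Int)) + 1 + 1 = 2 * ((n + 1 : Nat) : Int) := by push_cast; ring
      have ih := pvFold_enumerate rest (n + 1) (acc ++ [PySem.Chars.lowerChar a, PySem.Chars.upperChar b])
      simp only [PySem.List.enumerate, List.foldl, h2]
      rw [show pvStepA acc (2 * (n : Int), a) = acc ++ [PySem.Chars.lowerChar a] from by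
            simp [pvStepA],
          show pvStepA (acc ++ [PySem.Chars.lowerChar a]) (2 * (n : Int) + 1, b)
              = acc ++ [PySem.Chars.lowerChar a, PySem.Chars.upperChar b] from by
            simp [pvStepA],
          ih]
      simp [pvPairs]

-- ===== VERDICT (by name: the statement is the Claim_ definition above) =====
theorem reverse_cap_lower_spec : Claim_equal_reverse_cap_lower := by
  intro s _
  unfold Spec_reverse_cap_lower reverse_cap_lower reverse_cap_lower_alt
  have h := pvFold_enumerate s.toList 0 []
  norm_num at h
  exact congrArg String.ofList h
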